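-- pv_equiv track=rewrite | github.com/jjeln/Advent-of-Code-2019 | Day03/main.py | GetLengthIntersections
-- ===== SOURCE A (Python) =====
-- def GetLengthIntersections(firstWire, secondWire, intersections):
--     listLength = []
--     for i in range(0, len(intersections)):
--         thisLength = 0
--         for j in range(0, len(firstWire)):
--             if(intersections[i] == firstWire[j][:2]):
--                 thisLength += firstWire[j][2]
--         for k in range(0, len(secondWire)):
--             if(intersections[i] == secondWire[k][:2]):
--                 thisLength += secondWire[k][2]
--         listLength.append((intersections[i][0], intersections[i][1], thisLength))
--     return listLength
-- ===== SOURCE B (Python) =====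
-- def GetLengthIntersections(firstWire, secondWire, intersections):
--     # One pass over each wire builds a point -> summed-length dict; one lookup per intersection.
--     lengths = {}
--     for (x, y, l) in firstWire:
--         lengths[(x, y)] = lengths.get((x, y), 0) + l
--     for (x, y, l) in secondWire:
--         lengths[(x, y)] = lengths.get((x, y), 0) + l
--     return [(x, y, lengths.get((x, y), 0)) for (x, y) in intersections]
-- ===== Notes on version B (the rewrite author's own statement) =====
-- stated objective: faster
-- what changed: Replaces the per-intersection rescans of both wires with dicts mapping point -> summed step length built once, then one O(1) lookup per intersection.
import Mathlib
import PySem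

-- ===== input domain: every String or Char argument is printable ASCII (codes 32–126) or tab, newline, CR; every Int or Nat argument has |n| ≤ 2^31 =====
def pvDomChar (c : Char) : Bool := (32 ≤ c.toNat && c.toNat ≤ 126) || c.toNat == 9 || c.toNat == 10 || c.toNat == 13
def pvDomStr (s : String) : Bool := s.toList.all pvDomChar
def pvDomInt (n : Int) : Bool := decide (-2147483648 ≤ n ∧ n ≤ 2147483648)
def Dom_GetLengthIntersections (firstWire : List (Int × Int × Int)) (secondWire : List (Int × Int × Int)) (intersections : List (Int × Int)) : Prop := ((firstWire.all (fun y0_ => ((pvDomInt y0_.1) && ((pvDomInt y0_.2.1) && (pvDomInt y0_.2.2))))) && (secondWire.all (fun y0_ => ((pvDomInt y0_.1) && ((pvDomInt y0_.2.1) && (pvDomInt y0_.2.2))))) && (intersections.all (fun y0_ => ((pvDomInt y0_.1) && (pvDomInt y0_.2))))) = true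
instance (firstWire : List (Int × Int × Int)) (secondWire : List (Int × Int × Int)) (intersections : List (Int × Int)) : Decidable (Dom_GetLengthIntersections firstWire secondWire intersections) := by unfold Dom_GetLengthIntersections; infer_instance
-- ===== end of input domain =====

-- B replaces A's per-intersection rescans of both wires with point->summed-length dicts built once (objective: faster).

-- ===== PORT A =====
-- inner loop body: 'if intersections[i] == wire[j][:2]: thisLength += wire[j][2]'
def pvSumStep (pt : Int × Int) (t : Int) (e : Int × Int × Int) : Int :=
  if pt = (e.1, e.2.1) then t + e.2.2 else t

-- body of the outer 'for i in range(0, len(intersections))' loop, applied to intersections[i]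
def pvAStep (firstWire secondWire : List (Int × Int × Int)) (acc : List (Int × Int × Int)) (pt : Int × Int) : List (Int × Int × Int) :=
  acc ++ [(pt.1, pt.2,
    (PySem.List.pyRange 0 (secondWire.length : Int) 1).foldl
      (fun t k => pvSumStep pt t (PySem.List.pyGetD secondWire k (0, 0, 0)))
      ((PySem.List.pyRange 0 (firstWire.length : Int) 1).foldl
        (fun t j => pvSumStep pt t (PySem.List.pyGetD firstWire j (0, 0, 0))) 0))]

def GetLengthIntersections (firstWire : List (Int × Int × Int)) (secondWire : List (Int × Int × Int)) (intersections : List (Int × Int)) : List (Int × Int × Int) :=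
  (PySem.List.pyRange 0 (intersections.length : Int) 1).foldl
    (fun acc i => pvAStep firstWire secondWire acc (PySem.List.pyGetD intersections i (0, 0))) []

-- ===== PORT B =====
-- 'lengths[(x,y)] = lengths.get((x,y), 0) + l'
def pvAddWire (d : PySem.Dict (Int × Int) Int) (w : List (Int × Int × Int)) : PySem.Dict (Int × Int) Int :=
  w.foldl (fun d p => d.modify (p.1, p.2.1) 0 (· + p.2.2)) d

def GetLengthIntersections_alt (firstWire : List (Int × Int × Int)) (secondWire : List (Int × Int × Int)) (intersections : List (Int × Int)) : List (Int × Int × Int) :=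
  let lengths := pvAddWire (pvAddWire PySem.Dict.empty firstWire) secondWire
  intersections.map (fun q => (q.1, q.2, lengths.getD q 0))

-- ===== PRECONDITION & SPEC =====
def Spec_GetLengthIntersections (firstWire : List (Int × Int × Int)) (secondWire : List (Int × Int × Int)) (intersections : List (Int × Int)) (out : List (Int × Int × Int)) : Prop := out = GetLengthIntersections_alt firstWire secondWire intersections
instance (firstWire : List (Int × Int × Int)) (secondWire : List (Int × Int × Int)) (intersections : List (Int × Int)) (out : List (Int × Int × Int)) : Decidable (Spec_GetLengthIntersections firstWire secondWire intersections out) := by unfold Spec_GetLengthIntersections; infer_instance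

-- ===== CLAIM (what is proved, stated in full; the proofs are below) =====
def Claim_equal_GetLengthIntersections : Prop := ∀ (firstWire : List (Int × Int × Int)) (secondWire : List (Int × Int × Int)) (intersections : List (Int × Int)), Dom_GetLengthIntersections firstWire secondWire intersections → Spec_GetLengthIntersections firstWire secondWire intersections (GetLengthIntersections firstWire secondWire intersections)

-- ===== LEMMAS AND PROOFS =====

-- the dict built by B's wire loop looks up to exactly A's matching-sum fold
theorem pvAddWire_getD (w : List (Int × Int × Int)) (d : PySem.Dict (Int × Int) Int) (k : Int × Int) :
    (pvAddWire d w).getD k 0 = w.foldl (fun t e => pvSumStep k t e) (d.getD k 0) := by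
  induction w generalizing d with
  | nil => rfl
  | cons e tl ih =>
    simp only [pvAddWire, List.foldl_cons] at *
    rw [ih, PySem.Dict.getD_modify, pvSumStep]
    split_ifs <;> simp_all

theorem GetLengthIntersections_spec' (firstWire secondWire : List (Int × Int × Int)) (intersections : List (Int × Int)) :
    GetLengthIntersections firstWire secondWire intersections = GetLengthIntersections_alt firstWire secondWire intersections := by
  unfold GetLengthIntersections GetLengthIntersections_alt
  rw [PySem.List.foldl_pyRange_zero_pyGetD' intersections (0, 0)
      (fun acc pt => pvAStep firstWire secondWire acc pt) []]
  have hstep : ∀ acc pt, pvAStep firstWire secondWire acc pt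
      = acc ++ [(pt.1, pt.2, ((pvAddWire (pvAddWire PySem.Dict.empty firstWire) secondWire).getD pt 0))] := by
    intro acc pt
    unfold pvAStep
    rw [PySem.List.foldl_pyRange_zero_pyGetD' secondWire (0, 0, 0) (fun t e => pvSumStep pt t e),
        PySem.List.foldl_pyRange_zero_pyGetD' firstWire (0, 0, 0) (fun t e => pvSumStep pt t e),
        pvAddWire_getD, pvAddWire_getD]
    simp [PySem.Dict.getD_empty]
  simp only [hstep]
  rw [PySem.List.foldl_append_singleton_eq_map]
  simp

-- ===== VERDICT (by name: the statement is the Claim_ definition above) =====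
theorem GetLengthIntersections_spec : Claim_equal_GetLengthIntersections := by
  intro fw sw its _
  exact GetLengthIntersections_spec' fw sw its
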